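-- pv_equiv track=rewrite | github.com/linuxcaffe/taskschedule | taskschedule/schedule.py | align_matrix
-- ===== SOURCE A (Python) =====
-- def align_matrix(array):
--     """Align all columns in a matrix by padding the items with spaces.
--        Return the aligned array."""
--     col_sizes = {}
--     for row in array:
--         for i, col in enumerate(row):
--             col_sizes[i] = max(col_sizes.get(i, 0), len(col))
--
--     ncols = len(col_sizes)
--     result = []
--     for row in array:
--         row = list(row) + [''] * (ncols - len(row))
--         for i, col in enumerate(row):
--             row[i] = col.ljust(col_sizes[i])
--
--         result.append(row)
--
--     return result
-- ===== SOURCE B (Python) =====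
-- def align_matrix(array):
--     """Align all columns in a matrix by padding the items with spaces.
--        Return the aligned array."""
--     def go(n, rows):
--         # n = number of columns still to align
--         if n == 0:
--             return [[] for _ in rows]
--         width = max(len(r[0]) if r else 0 for r in rows)
--         tails = go(n - 1, [r[1:] for r in rows])
--         return [[(r[0] if r else '').ljust(width)] + t for r, t in zip(rows, tails)]
--     return go(max(map(len, array), default=0), array)
-- ===== Notes on version B (the rewrite author's own statement) =====
-- stated objective: alternative
-- what changed: B aligns the matrix column-by-column with structural recursion: it pads the first column to the max head length and recurses on the row tails, never materializing a width table or dict; A makes two row-major passes accumulating a per-column width dict and then rewriting each row. The recursion re-slices the row tails, so B trades speed on very wide matrices for the simpler columnwise decomposition.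
import Mathlib
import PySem

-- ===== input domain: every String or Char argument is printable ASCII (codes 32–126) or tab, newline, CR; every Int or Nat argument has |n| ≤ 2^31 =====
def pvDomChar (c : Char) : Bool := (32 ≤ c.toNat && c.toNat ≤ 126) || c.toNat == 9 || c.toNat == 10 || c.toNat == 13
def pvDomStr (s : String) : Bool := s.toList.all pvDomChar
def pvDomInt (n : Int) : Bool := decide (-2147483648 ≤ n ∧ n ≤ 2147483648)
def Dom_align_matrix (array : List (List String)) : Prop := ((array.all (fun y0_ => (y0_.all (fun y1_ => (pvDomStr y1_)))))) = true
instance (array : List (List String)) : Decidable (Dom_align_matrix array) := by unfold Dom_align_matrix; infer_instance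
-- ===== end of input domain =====

-- B aligns column-by-column: it pads the first column and recurses on the row tails,
-- never building a width table; A scans row-major twice with a width dict. Same cost, different shape.

-- ===== PORT A =====
-- s.ljust(w): pad on the right with spaces to width w (hand port, PySem has no ljust;
-- exact: Python pads with ' ', and a width ≤ len(s) leaves s unchanged — toNat clamps like '' * negative)
def pyLjust (s : String) (w : Int) : String :=
  String.ofList (s.toList ++ List.replicate (w - PySem.Str.len s).toNat ' ')

def align_matrix (array : List (List String)) : List (List String) :=
  let col_sizes : PySem.Dict Int Int :=
    array.foldl (fun d row =>
      (PySem.List.enumerate row).foldl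
        (fun d p => d.insert p.1 (max (d.getD p.1 0) (PySem.Str.len p.2))) d)
      PySem.Dict.empty
  let ncols : Int := col_sizes.size
  -- col_sizes[i]: the key i is always present here (keys are exactly 0..ncols-1), so getD is exact
  array.foldl (fun result row =>
    let row2 := row ++ PySem.List.pyRepeat [""] (ncols - row.length)
    result ++ [(PySem.List.enumerate row2).map (fun p => pyLjust p.2 (col_sizes.getD p.1 0))]) []

-- ===== PORT B =====
-- max(nonempty iterable); the [] branch is unreachable at the call site (go is only reached with rows ≠ [])
def pyMax1 (xs : List Int) : Int :=
  match xs with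
  | [] => 0
  | x :: t => t.foldl max x

-- go(n, rows): align the first n columns; structural recursion on the column count n
def goAlign (n : Nat) (rows : List (List String)) : List (List String) :=
  match n with
  | 0 => rows.map (fun _ => [])
  | Nat.succ m =>
    let width := pyMax1 (rows.map (fun r => if r.isEmpty then 0 else PySem.Str.len (r.headD "")))
    let tails := goAlign m (rows.map (fun r => PySem.List.slice r (some 1) none))  -- r[1:]
    (rows.zip tails).map (fun p => pyLjust (p.1.headD "") width :: p.2)

-- go(max(map(len, array), default=0), array); the max is ≥ 0 (lengths, default 0), so .toNat is exact
def align_matrix_alt (array : List (List String)) : List (List String) :=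
  goAlign (PySem.List.maxD (array.map (fun r => PySem.List.len r)) (fun y => y) 0).toNat array

-- ===== PRECONDITION & SPEC =====
def Spec_align_matrix (array : List (List String)) (out : List (List String)) : Prop := out = align_matrix_alt array
instance (array : List (List String)) (out : List (List String)) : Decidable (Spec_align_matrix array out) := by unfold Spec_align_matrix; infer_instance

-- ===== CLAIM (what is proved, stated in full; the proofs are below) =====
def Claim_equal_align_matrix : Prop := ∀ (array : List (List String)), Dom_align_matrix array → Spec_align_matrix array (align_matrix array)

-- ===== LEMMAS AND PROOFS =====

-- the number of columns, as a plain fold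
def ncolsNat (array : List (List String)) : Nat :=
  array.foldl (fun m row => max m row.length) 0

theorem foldl_max_tail_len (rows : List (List String)) (a : Nat) :
    rows.foldl (fun m r => max m r.tail.length) (a - 1) =
      rows.foldl (fun m r => max m r.length) a - 1 := by
  induction rows generalizing a with
  | nil => rfl
  | cons r t ih =>
    simp only [List.foldl_cons]
    rw [show max (a - 1) r.tail.length = max a r.length - 1 by rw [List.length_tail]; omega]
    exact ih (max a r.length)

theorem ncolsNat_map_tail (rows : List (List String)) :
    ncolsNat (rows.map List.tail) = ncolsNat rows - 1 := by
  unfold ncolsNat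
  rw [List.foldl_map]
  exact foldl_max_tail_len rows 0

theorem foldl_max_cast (l : List Nat) (a : Nat) :
    List.foldl (fun (m : Int) (n : Nat) => max m (n : Int)) (a : Int) l = ((l.foldl max a : Nat) : Int) := by
  induction l generalizing a with
  | nil => rfl
  | cons x t ih =>
    simp only [List.foldl_cons]
    rw [← Nat.cast_max, ih]

theorem maxD_len (array : List (List String)) :
    PySem.List.maxD (array.map (fun r => PySem.List.len r)) (fun y => y) 0 = (ncolsNat array : Int) := by
  cases array with
  | nil => rfl
  | cons r t =>
    simp only [PySem.List.maxD, List.map_cons, PySem.List.max?_id_cons, Option.getD_some]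
    unfold ncolsNat
    simp only [List.foldl_cons, List.foldl_map, PySem.List.len_eq, Nat.zero_max]
    have h := foldl_max_cast (t.map (fun r => r.length)) r.length
    rw [List.foldl_map, List.foldl_map] at h
    exact h

-- the column-size value at column i, as a plain fold (what A's dict ends up holding)
def colMax (array : List (List String)) (i : Nat) : Int :=
  array.foldl (fun m row => if i < row.length then max m (PySem.Str.len (row.getD i "")) else m) 0

-- the canonical result both ports are shown to equal
def canon (array : List (List String)) : List (List String) :=
  array.map (fun row => (List.range (ncolsNat array)).map
    (fun j => pyLjust (row.getD j "") (colMax array j)))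

-- abbreviations for A's two dict-building loops (proof-side only)
def innerStep (d : PySem.Dict Int Int) (p : Int × String) : PySem.Dict Int Int :=
  d.insert p.1 (max (d.getD p.1 0) (PySem.Str.len p.2))

def rowStep (d : PySem.Dict Int Int) (row : List String) : PySem.Dict Int Int :=
  (PySem.List.enumerate row).foldl innerStep d

theorem inner_getD (row : List String) (s : Nat) (d : PySem.Dict Int Int) (i : Nat) :
    ((PySem.List.enumerate row (s : Int)).foldl innerStep d).getD (i : Int) 0 =
      if s ≤ i ∧ i < s + row.length then
        max (d.getD (i : Int) 0) (PySem.Str.len (row.getD (i - s) ""))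
      else d.getD (i : Int) 0 := by
  induction row generalizing s d with
  | nil => simp
  | cons c rest ih =>
    rw [PySem.List.enumerate_cons]
    simp only [List.foldl_cons]
    have hcast : ((s : Int) + 1) = ((s + 1 : Nat) : Int) := by push_cast; ring
    rw [show innerStep d ((s : Int), c) = d.insert (s : Int) (max (d.getD (s : Int) 0) (PySem.Str.len c)) from rfl]
    rcases eq_or_ne i s with h | h
    · rw [hcast, ih, if_neg (show ¬(s + 1 ≤ i ∧ i < s + 1 + rest.length) by omega),
        PySem.Dict.getD_insert, if_pos (show (i : Int) = (s : Int) by exact_mod_cast h),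
        if_pos (show s ≤ i ∧ i < s + (c :: rest).length by simp only [List.length_cons]; omega)]
      have h2 : i - s = 0 := by omega
      rw [h2]
      simp [h]
    · rw [hcast, ih]
      by_cases hc : s + 1 ≤ i ∧ i < s + 1 + rest.length
      · rw [if_pos hc, PySem.Dict.getD_insert, if_neg (show ¬((i : Int) = (s : Int)) by exact_mod_cast h),
          if_pos (show s ≤ i ∧ i < s + (c :: rest).length by simp only [List.length_cons]; omega)]
        have h2 : i - s = (i - (s + 1)) + 1 := by omega
        rw [h2]
        rfl
      · rw [if_neg hc, PySem.Dict.getD_insert, if_neg (show ¬((i : Int) = (s : Int)) by exact_mod_cast h),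
          if_neg (show ¬(s ≤ i ∧ i < s + (c :: rest).length) by simp only [List.length_cons]; omega)]

theorem inner_keys (row : List String) (s k : Nat) (d : PySem.Dict Int Int)
    (hd : d.keys = (List.range k).map (Int.ofNat)) (hs : s ≤ k) :
    ((PySem.List.enumerate row (s : Int)).foldl innerStep d).keys =
      (List.range (max k (s + row.length))).map (Int.ofNat) := by
  induction row generalizing s k d with
  | nil => simpa [hd] using congrArg (fun n => (List.range n).map Int.ofNat) (by omega : k = max k (s + 0))
  | cons c rest ih =>
    rw [PySem.List.enumerate_cons]
    simp only [List.foldl_cons]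
    have hstep : innerStep d ((s : Int), c) = d.insert (s : Int) (max (d.getD (s : Int) 0) (PySem.Str.len c)) := rfl
    have hcast : ((s : Int) + 1) = ((s + 1 : Nat) : Int) := by push_cast; ring
    rcases Nat.lt_or_ge s k with hlt | hge
    · have hcont : d.contains (s : Int) = true := by
        rw [PySem.Dict.contains_iff_mem_keys, hd]
        exact List.mem_map.mpr ⟨s, List.mem_range.mpr hlt, rfl⟩
      rw [hstep, hcast, ih (s + 1) k _ (by rw [PySem.Dict.keys_insert_of_contains _ _ hcont]; exact hd) (by omega)]
      simp only [List.length_cons]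
      have he : max k (s + 1 + rest.length) = max k (s + (rest.length + 1)) := by omega
      rw [he]
    · have hsk : s = k := le_antisymm hs hge
      subst hsk
      have hcont : d.contains (s : Int) = false := by
        rw [← Bool.not_eq_true, PySem.Dict.contains_iff_mem_keys, hd]
        intro hmem
        obtain ⟨j, hj, hje⟩ := List.mem_map.mp hmem
        have hj' := List.mem_range.mp hj
        have hji : (j : Int) = (s : Int) := hje
        omega
      rw [hstep, hcast, ih (s + 1) (s + 1) _ (by
          rw [PySem.Dict.keys_insert_of_not_contains _ _ hcont, hd, List.range_succ, List.map_append]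
          rfl) (le_refl _)]
      simp only [List.length_cons]
      have he : max (s + 1) (s + 1 + rest.length) = max s (s + (rest.length + 1)) := by omega
      rw [he]

theorem outer_getD (array : List (List String)) (d : PySem.Dict Int Int) (i : Nat) :
    (array.foldl rowStep d).getD (i : Int) 0 =
      array.foldl (fun m row => if i < row.length then max m (PySem.Str.len (row.getD i "")) else m)
        (d.getD (i : Int) 0) := by
  induction array generalizing d with
  | nil => rfl
  | cons row rest ih =>
    simp only [List.foldl_cons]
    rw [ih]
    congr 1
    rw [show rowStep d row = (PySem.List.enumerate row (((0 : Nat) : Int))).foldl innerStep d from rfl,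
      inner_getD row 0 d i]
    by_cases hl : i < row.length
    · rw [if_pos (show 0 ≤ i ∧ i < 0 + row.length by omega), if_pos hl]
      simp
    · rw [if_neg (show ¬(0 ≤ i ∧ i < 0 + row.length) by omega), if_neg hl]

theorem outer_keys (array : List (List String)) (d : PySem.Dict Int Int) (k : Nat)
    (hd : d.keys = (List.range k).map (Int.ofNat)) :
    (array.foldl rowStep d).keys =
      (List.range (array.foldl (fun m row => max m row.length) k)).map (Int.ofNat) := by
  induction array generalizing d k with
  | nil => exact hd
  | cons row rest ih =>
    simp only [List.foldl_cons]
    have h1 : (rowStep d row).keys = (List.range (max k row.length)).map (Int.ofNat) := by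
      have := inner_keys row 0 k d hd (Nat.zero_le _)
      simpa using this
    rw [ih _ _ h1]

-- A equals the canonical result
theorem A_eq_canon (array : List (List String)) : align_matrix array = canon array := by
  have hkeys : (array.foldl rowStep PySem.Dict.empty).keys = (List.range (ncolsNat array)).map Int.ofNat :=
    outer_keys array PySem.Dict.empty 0 (by simp [PySem.Dict.keys_empty])
  have hsize : (array.foldl rowStep PySem.Dict.empty).size = ncolsNat array := by
    have h1 : (array.foldl rowStep PySem.Dict.empty).keys.length = ncolsNat array := by
      rw [hkeys]; simp
    simpa [PySem.Dict.size, PySem.Dict.keys] using h1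
  have hget : ∀ i : Nat, (array.foldl rowStep PySem.Dict.empty).getD (i : Int) 0 = colMax array i := by
    intro i
    rw [outer_getD, PySem.Dict.getD_empty]
    rfl
  have ha : align_matrix array = array.foldl (fun result row => result ++
      [(PySem.List.enumerate (row ++ PySem.List.pyRepeat [""]
          (((array.foldl rowStep PySem.Dict.empty).size : Int) - row.length))).map
        (fun p => pyLjust p.2 ((array.foldl rowStep PySem.Dict.empty).getD p.1 0))]) [] := rfl
  rw [ha, PySem.List.foldl_append_singleton_eq_map, List.nil_append, hsize]
  unfold canon
  apply List.map_congr_left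
  intro row hrow
  have hle : row.length ≤ ncolsNat array :=
    (PySem.List.le_foldl_max_nat array (fun r => r.length) 0).2 row hrow
  rw [PySem.List.pyRepeat_singleton]
  have hpad : ((ncolsNat array : Int) - (row.length : Int)).toNat = ncolsNat array - row.length := by
    omega
  rw [hpad]
  apply List.ext_getElem
  · simp only [List.length_map, PySem.List.length_enumerate, List.length_append,
      List.length_replicate, List.length_range]
    omega
  · intro j h1 h2
    simp only [List.length_map, PySem.List.length_enumerate, List.length_append,
      List.length_replicate] at h1
    simp only [List.length_map, List.length_range] at h2
    rw [List.getElem_map, List.getElem_map, PySem.List.getElem_enumerate, List.getElem_range]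
    simp only [zero_add]
    rw [hget j]
    congr 1
    by_cases hj : j < row.length
    · rw [List.getElem_append_left hj, List.getD_eq_getElem?_getD, List.getElem?_eq_getElem hj]
      rfl
    · rw [List.getElem_append_right (by omega), List.getElem_replicate,
        List.getD_eq_getElem?_getD, List.getElem?_eq_none (by omega)]
      rfl

-- B-side facts
theorem zip_self_map {α β : Type} (l : List α) (g : α → β) :
    l.zip (l.map g) = l.map (fun a => (a, g a)) := by
  induction l with
  | nil => rfl
  | cons x t ih => simp [ih]

theorem getD_tail {α : Type} (r : List α) (j : Nat) (d : α) :
    r.tail.getD j d = r.getD (j + 1) d := by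
  cases r <;> simp [List.getD]

theorem headD_eq_getD_zero (r : List String) : r.headD "" = r.getD 0 "" := by
  cases r <;> rfl

theorem colMax_map_tail (rows : List (List String)) (j : Nat) :
    colMax (rows.map List.tail) j = colMax rows (j + 1) := by
  unfold colMax
  rw [List.foldl_map]
  apply List.foldl_ext
  intro m r _
  simp only [List.length_tail, getD_tail]
  rcases Nat.lt_or_ge (j + 1) r.length with hl | hl
  · rw [if_pos (by omega), if_pos (by omega)]
  · rw [if_neg (by omega), if_neg (by omega)]

theorem width_eq_colMax_zero (rows : List (List String)) :
    pyMax1 (rows.map (fun r => if r.isEmpty then 0 else PySem.Str.len (r.headD ""))) =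
      colMax rows 0 := by
  have h1 : ∀ (m : Int), 0 ≤ m →
      rows.foldl (fun m r => max m (if r.isEmpty then 0 else PySem.Str.len (r.headD ""))) m =
      rows.foldl (fun m r => if 0 < r.length then max m (PySem.Str.len (r.getD 0 "")) else m) m := by
    intro m hm
    induction rows generalizing m with
    | nil => rfl
    | cons r t ih =>
      simp only [List.foldl_cons]
      cases r with
      | nil =>
        simp only [List.isEmpty_nil, if_pos, List.length_nil]
        rw [if_neg (by omega), max_eq_left hm]
        exact ih m hm
      | cons a b =>
        simp only [List.isEmpty_cons, List.length_cons, List.headD_cons]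
        rw [if_neg (by simp), if_pos (by omega)]
        have : (a :: b).getD 0 "" = a := rfl
        rw [this]
        exact ih _ (le_trans hm (le_max_left _ _))
  have h2 : pyMax1 (rows.map (fun r => if r.isEmpty then 0 else PySem.Str.len (r.headD ""))) =
      rows.foldl (fun m r => max m (if r.isEmpty then 0 else PySem.Str.len (r.headD ""))) 0 := by
    cases rows with
    | nil => rfl
    | cons r t =>
      simp only [List.map_cons, pyMax1, List.foldl_cons]
      have h0 : 0 ≤ (if r.isEmpty then (0:Int) else PySem.Str.len (r.headD "")) := by
        split
        · exact le_rfl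
        · rw [PySem.Str.len_eq]; positivity
      rw [max_eq_right h0, List.foldl_map]
  rw [h2, h1 0 le_rfl]
  rfl

theorem goAlign_eq_canon (n : Nat) :
    ∀ rows : List (List String), ncolsNat rows = n → goAlign n rows = canon rows := by
  induction n with
  | zero =>
    intro rows hn
    unfold canon
    rw [hn]
    simp [goAlign]
  | succ n ih =>
    intro rows hn
    rw [show goAlign (n + 1) rows =
        (rows.zip (goAlign n (rows.map (fun r => PySem.List.slice r (some 1) none)))).map
          (fun p => pyLjust (p.1.headD "")
            (pyMax1 (rows.map (fun r => if r.isEmpty then 0 else PySem.Str.len (r.headD "")))) :: p.2)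
      from rfl]
    simp only [PySem.List.slice_from_one]
    have htails : ncolsNat (rows.map List.tail) = n := by
      rw [ncolsNat_map_tail, hn]
      omega
    rw [ih (rows.map List.tail) htails]
    unfold canon
    rw [htails, hn, List.map_map, zip_self_map, List.map_map]
    apply List.map_congr_left
    intro r _
    simp only [Function.comp]
    rw [List.range_succ_eq_map, List.map_cons, List.map_map]
    congr 1
    · rw [headD_eq_getD_zero, width_eq_colMax_zero]
    · apply List.map_congr_left
      intro j _
      simp only [Function.comp]
      rw [getD_tail, colMax_map_tail]

theorem ports_eq (array : List (List String)) : align_matrix array = align_matrix_alt array := by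
  rw [A_eq_canon]
  unfold align_matrix_alt
  rw [maxD_len, Int.toNat_natCast]
  exact (goAlign_eq_canon (ncolsNat array) array rfl).symm ▸ rfl

-- ===== VERDICT (by name: the statement is the Claim_ definition above) =====
theorem align_matrix_spec : Claim_equal_align_matrix := by
  intro array _
  unfold Spec_align_matrix
  exact ports_eq array
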